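-- pv_equiv track=rewrite | github.com/Judongsung/algorithm | 백준/Silver/2607. 비슷한 단어/비슷한 단어.py | count_similar_word
-- ===== SOURCE A (Python) =====
-- from collections import Counter
-- from typing import List
--
-- def count_similar_word(words: List[str], target: str) -> int:
--     count = 0
--     target_length = len(target)
--     target_counter = Counter(target)
--     target_chs = set(target)
--
--     for word in words:
--         len_diff = abs(len(word)-target_length)
--         if len_diff > 1:
--             continue
--         counter = Counter(word)
--         diff_count = 0
--
--         for ch in target_chs|set(word):
--             diff_count += abs(counter[ch]-target_counter[ch])
--             if diff_count > 2:
--                 break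
--         else:
--             if diff_count == 0 or (len_diff == 0 and diff_count == 2) or (len_diff == 1 and diff_count == 1):
--                 count += 1
--
--     return count
-- ===== SOURCE B (Python) =====
-- from typing import List
--
-- def count_similar_word(words: List[str], target: str) -> int:
--     # Sort-and-merge instead of Counter arithmetic: for each word, merge its sorted
--     # characters against the sorted target with two pointers, counting characters
--     # exclusive to each side (a = only in word, b = only in target).  The word is
--     # similar exactly when a <= 1 and b <= 1 (this subsumes the length guard, since
--     # len(word) - len(target) == a - b).
--     t = sorted(target)
--     n = len(t)
--     count = 0
--     for word in words:
--         w = sorted(word)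
--         i = j = a = b = 0
--         while i < len(w) and j < n:
--             if w[i] == t[j]:
--                 i += 1
--                 j += 1
--             elif w[i] < t[j]:
--                 a += 1
--                 i += 1
--             else:
--                 b += 1
--                 j += 1
--         a += len(w) - i
--         b += n - j
--         if a <= 1 and b <= 1:
--             count += 1
--     return count
-- ===== Notes on version B (the rewrite author's own statement) =====
-- stated objective: alternative
-- what changed: Replaced the Counter/set-union symmetric-difference computation and the three-way classification by sorting each word and the target and merging them with two pointers, counting characters exclusive to each side (a, b); the word is similar exactly when a <= 1 and b <= 1, which subsumes the length guard since len(word)-len(target) = a-b.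
import Mathlib
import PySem

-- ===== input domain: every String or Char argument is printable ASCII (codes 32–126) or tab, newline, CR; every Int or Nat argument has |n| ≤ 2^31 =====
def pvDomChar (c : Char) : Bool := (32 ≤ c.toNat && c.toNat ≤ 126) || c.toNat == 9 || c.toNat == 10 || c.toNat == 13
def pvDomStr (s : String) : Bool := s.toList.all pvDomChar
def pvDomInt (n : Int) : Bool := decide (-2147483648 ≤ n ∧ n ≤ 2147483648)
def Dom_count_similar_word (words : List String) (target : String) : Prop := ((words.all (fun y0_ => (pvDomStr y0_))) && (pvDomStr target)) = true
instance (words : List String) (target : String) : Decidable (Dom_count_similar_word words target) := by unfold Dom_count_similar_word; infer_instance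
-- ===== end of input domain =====

-- B replaces A's Counter/set-union symmetric-difference test by sorting each word and the
-- target and merging them with two pointers, counting the characters exclusive to each side;
-- objective: an alternative algorithm of similar cost, with a simpler classification (a≤1 ∧ b≤1).

-- ===== PORT A =====
-- the inner 'for ch in target_chs|set(word): … if diff_count > 2: break' loop; none = break taken
def pvLoopA (chs : List Char) (counter targetCounter : PySem.Dict Char Int) (diffCount : Int) : Option Int :=
  match chs with
  | [] => some diffCount
  | ch :: rest =>
    let d := diffCount + |counter.getD ch 0 - targetCounter.getD ch 0|
    if d > 2 then none else pvLoopA rest counter targetCounter d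

def count_similar_word (words : List String) (target : String) : Int :=
  let targetLength : Int := PySem.Str.len target
  let targetCounter : PySem.Dict Char Int := PySem.Dict.counter target.toList
  let targetChs : PySem.Set Char := PySem.Set.ofList target.toList
  words.foldl (fun count word =>
    let lenDiff := |PySem.Str.len word - targetLength|
    if lenDiff > 1 then count
    else
      let counter : PySem.Dict Char Int := PySem.Dict.counter word.toList
      -- iteration over the set: the final count is order-independent (proved below)
      match pvLoopA (PySem.Set.union targetChs (PySem.Set.ofList word.toList)) counter targetCounter 0 with
      | none => count            -- break taken: the for-else body is skipped
      | some diffCount =>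
        if diffCount = 0 ∨ (lenDiff = 0 ∧ diffCount = 2) ∨ (lenDiff = 1 ∧ diffCount = 1)
        then count + 1 else count) 0

-- ===== PORT B =====
-- the 'while i < len(w) and j < n' two-pointer merge of Source B, as structural recursion on the
-- unread suffixes (i/j advance ≙ dropping the head); the trailing 'a += len(w)-i, b += n-j'
-- of Source B is the leftover-length addition of the two base cases
def pvMerge (w t : List Char) (a b : Int) : Int × Int :=
  match w, t with
  | [], t' => (a, b + t'.length)
  | x :: w', [] => (a + (x :: w').length, b)
  | x :: w', y :: t' =>
    if x = y then pvMerge w' t' a b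
    else if x < y then pvMerge w' (y :: t') (a + 1) b
    else pvMerge (x :: w') t' a (b + 1)
termination_by w.length + t.length

def count_similar_word_alt (words : List String) (target : String) : Int :=
  let t := PySem.List.sorted target.toList (fun c => c) false
  words.foldl (fun count word =>
    let w := PySem.List.sorted word.toList (fun c => c) false
    let p := pvMerge w t 0 0
    if p.1 ≤ 1 ∧ p.2 ≤ 1 then count + 1 else count) 0

-- ===== PRECONDITION & SPEC =====
def Spec_count_similar_word (words : List String) (target : String) (out : Int) : Prop := out = count_similar_word_alt words target
instance (words : List String) (target : String) (out : Int) : Decidable (Spec_count_similar_word words target out) := by unfold Spec_count_similar_word; infer_instance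

-- ===== CLAIM =====
def Claim_equal_count_similar_word : Prop := ∀ (words : List String) (target : String), Dom_count_similar_word words target → Spec_count_similar_word words target (count_similar_word words target)

-- ===== LEMMAS AND PROOFS =====

-- A's loop: break taken iff the full sum exceeds 2, else it returns the full sum
theorem pvLoopA_eq (c tc : PySem.Dict Char Int) (l : List Char) (a : Int) (ha : a ≤ 2) :
    pvLoopA l c tc a =
      (if a + (l.map fun ch => |c.getD ch 0 - tc.getD ch 0|).sum ≤ 2
       then some (a + (l.map fun ch => |c.getD ch 0 - tc.getD ch 0|).sum) else none) := by
  induction l generalizing a with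
  | nil => simp [pvLoopA, ha]
  | cons ch rest ih =>
    have hnn : 0 ≤ (rest.map fun ch => |c.getD ch 0 - tc.getD ch 0|).sum :=
      List.sum_nonneg (by intro x hx; simp at hx; obtain ⟨y, _, rfl⟩ := hx; exact abs_nonneg _)
    simp only [pvLoopA, List.map_cons, List.sum_cons]
    split_ifs with h1 h2 h3 <;> try rfl
    · omega
    · rw [ih _ (by omega)]; split_ifs with h4
      · ring_nf
      · omega
    · rw [ih _ (by omega)]; split_ifs with h4
      · omega
      · rfl

-- multiset subtraction under a shared head
theorem msub_cons_cons (x : Char) (s t : Multiset Char) :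
    (x ::ₘ s) - (x ::ₘ t) = s - t := by
  ext a
  simp only [Multiset.count_sub, Multiset.count_cons]
  split_ifs <;> omega

-- multiset subtraction when the new head is absent from the other side
theorem msub_cons_left (x : Char) (s t : Multiset Char) (hx : t.count x = 0) :
    ((x ::ₘ s) - t).card = (s - t).card + 1 := by
  have h : (x ::ₘ s) - t = x ::ₘ (s - t) := by
    ext a
    simp only [Multiset.count_sub, Multiset.count_cons]
    split_ifs with h1
    · subst h1; omega
    · omega
  rw [h, Multiset.card_cons]

theorem msub_cons_right (x : Char) (s t : Multiset Char) (hx : t.count x = 0) :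
    t - (x ::ₘ s) = t - s := by
  ext a
  simp only [Multiset.count_sub, Multiset.count_cons]
  split_ifs with h1
  · subst h1; omega
  · omega

-- the merge on two ≤-sorted lists computes the two multiset-difference sizes
theorem pvMerge_eq (w t : List Char) (a b : Int)
    (hw : w.Pairwise (· ≤ ·)) (ht : t.Pairwise (· ≤ ·)) :
    pvMerge w t a b =
      (a + (((↑w : Multiset Char) - ↑t).card : Int),
       b + (((↑t : Multiset Char) - ↑w).card : Int)) := by
  induction w generalizing t a b with
  | nil =>
    simp [pvMerge, Multiset.coe_nil, Multiset.coe_card]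
  | cons x w' ihw =>
    induction t generalizing a b with
    | nil =>
      simp [pvMerge, Multiset.coe_nil, Multiset.coe_card]
    | cons y t' iht =>
      have hw' : w'.Pairwise (· ≤ ·) := (List.pairwise_cons.1 hw).2
      have ht' : t'.Pairwise (· ≤ ·) := (List.pairwise_cons.1 ht).2
      simp only [pvMerge]
      split_ifs with h1 h2
      · subst h1
        rw [ihw t' a b hw' ht']
        simp only [← Multiset.cons_coe, msub_cons_cons]
      · -- x < y: x is absent from y :: t'
        have hxnot : (y ::ₘ (↑t' : Multiset Char)).count x = 0 := by
          show ((↑(y :: t') : Multiset Char)).count x = 0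
          rw [Multiset.coe_count, List.count_eq_zero]
          intro hmem
          have hhd := (List.pairwise_cons.1 ht).1
          rcases List.mem_cons.1 hmem with h | h
          · exact absurd h.symm (ne_of_gt h2)
          · exact absurd (hhd x h) (not_le.2 h2)
        rw [ihw (y :: t') (a + 1) b hw' ht]
        simp only [← Multiset.cons_coe]
        rw [msub_cons_left x (↑w') (y ::ₘ ↑t') hxnot,
            msub_cons_right x (↑w') (y ::ₘ ↑t') hxnot]
        simp only [Prod.mk.injEq]
        constructor <;> first | trivial | (push_cast; ring)
      · -- y < x: y is absent from x :: w'
        have hlt : y < x := lt_of_le_of_ne (not_lt.1 h2) (Ne.symm h1)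
        have hynot : (x ::ₘ (↑w' : Multiset Char)).count y = 0 := by
          show ((↑(x :: w') : Multiset Char)).count y = 0
          rw [Multiset.coe_count, List.count_eq_zero]
          intro hmem
          have hhd := (List.pairwise_cons.1 hw).1
          rcases List.mem_cons.1 hmem with h | h
          · exact absurd h.symm (ne_of_gt hlt)
          · exact absurd (hhd y h) (not_le.2 hlt)
        rw [iht a (b + 1) ht']
        simp only [← Multiset.cons_coe]
        rw [msub_cons_left y (↑t') (x ::ₘ ↑w') hynot,
            msub_cons_right y (↑t') (x ::ₘ ↑w') hynot]
        simp only [Prod.mk.injEq]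
        constructor <;> first | trivial | (push_cast; ring)

-- a Nodup list sum equals the sum over a Nodup superlist on which f vanishes outside it
theorem nodup_sum_sub (big small : List Char) (f : Char → Int)
    (hb : big.Nodup) (hs : small.Nodup) (hsub : ∀ x ∈ small, x ∈ big)
    (hz : ∀ x ∈ big, x ∉ small → f x = 0) :
    (big.map f).sum = (small.map f).sum := by
  rw [← List.sum_toFinset f hb, ← List.sum_toFinset f hs]
  exact (Finset.sum_subset (by intro x hx; simp only [List.mem_toFinset] at *; exact hsub x hx)
    (by intro x hx hnx; simp only [List.mem_toFinset] at *; exact hz x hx hnx)).symm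

-- the clamped per-character sum over the distinct characters of w is the card of the multiset difference
theorem clamped_sum_eq (w t : List Char) :
    (((PySem.Set.ofList w).map fun k => max ((w.count k : Int) - (t.count k : Int)) 0).sum)
      = ((((↑w : Multiset Char) - ↑t).card : Nat) : Int) := by
  have hnd : (PySem.Set.ofList w).Nodup := PySem.Set.nodup_ofList w
  rw [← List.sum_toFinset _ hnd]
  have hfs : (PySem.Set.ofList w).toFinset = ((↑w : Multiset Char)).toFinset := by
    ext x
    simp [List.mem_toFinset, PySem.Set.mem_ofList]
  rw [hfs]
  have hcongr : ∑ k ∈ ((↑w : Multiset Char)).toFinset, max ((w.count k : Int) - (t.count k : Int)) 0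
      = ∑ k ∈ ((↑w : Multiset Char)).toFinset, ((((↑w : Multiset Char) - ↑t).count k : Nat) : Int) := by
    refine Finset.sum_congr rfl fun x _ => ?_
    rw [Multiset.count_sub, Multiset.coe_count, Multiset.coe_count, max_def]
    split_ifs <;> omega
  rw [hcongr, ← Nat.cast_sum]
  congr 1
  calc ∑ k ∈ ((↑w : Multiset Char)).toFinset, ((↑w : Multiset Char) - ↑t).count k
      = ∑ k ∈ (((↑w : Multiset Char) - ↑t)).toFinset, ((↑w : Multiset Char) - ↑t).count k := by
        refine (Finset.sum_subset
          (Multiset.toFinset_subset.2 (Multiset.subset_of_le (tsub_le_self))) ?_).symm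
        intro x _ hnx
        exact Multiset.count_eq_zero_of_notMem (by simpa using hnx)
    _ = ((↑w : Multiset Char) - ↑t).card := Multiset.toFinset_sum_count_eq _

-- A's per-word diff sum over the union set, split into the two clamped sums
theorem unionSum_eq (w t : List Char) :
    ((PySem.Set.union (PySem.Set.ofList t) (PySem.Set.ofList w)).map
        fun ch => |((PySem.Dict.counter w).getD ch 0) - ((PySem.Dict.counter t).getD ch 0)|).sum
      = ((((↑w : Multiset Char) - ↑t).card : Nat) : Int)
        + ((((↑t : Multiset Char) - ↑w).card : Nat) : Int) := by
  have hU : (PySem.Set.union (PySem.Set.ofList t) (PySem.Set.ofList w)).Nodup :=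
    PySem.Set.nodup_union _ _ (PySem.Set.nodup_ofList t)
  have hmemU : ∀ x, x ∈ PySem.Set.union (PySem.Set.ofList t) (PySem.Set.ofList w) ↔ (x ∈ t ∨ x ∈ w) := by
    intro x
    rw [PySem.Set.mem_union]
    simp [PySem.Set.mem_ofList]
  have habs : ∀ ch : Char, |((PySem.Dict.counter w).getD ch 0) - ((PySem.Dict.counter t).getD ch 0)|
      = max ((w.count ch : Int) - (t.count ch : Int)) 0 + max ((t.count ch : Int) - (w.count ch : Int)) 0 := by
    intro ch
    simp only [PySem.Dict.getD_counter]
    rcases abs_cases ((w.count ch : Int) - (t.count ch : Int)) with ⟨h1, h2⟩ | ⟨h1, h2⟩ <;> omega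
  have hsplit : ((PySem.Set.union (PySem.Set.ofList t) (PySem.Set.ofList w)).map
        fun ch => |((PySem.Dict.counter w).getD ch 0) - ((PySem.Dict.counter t).getD ch 0)|).sum
      = ((PySem.Set.union (PySem.Set.ofList t) (PySem.Set.ofList w)).map
          fun ch => max ((w.count ch : Int) - (t.count ch : Int)) 0).sum
        + ((PySem.Set.union (PySem.Set.ofList t) (PySem.Set.ofList w)).map
          fun ch => max ((t.count ch : Int) - (w.count ch : Int)) 0).sum := by
    rw [← List.sum_map_add]
    exact congrArg List.sum (List.map_congr_left (fun ch _ => habs ch))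
  rw [hsplit]
  congr 1
  · rw [nodup_sum_sub _ (PySem.Set.ofList w) _ hU (PySem.Set.nodup_ofList w)
      (fun x hx => (hmemU x).2 (Or.inr ((PySem.Set.mem_ofList _ _).1 hx)))
      (by intro x _ hnx
          have : x ∉ w := fun h => hnx ((PySem.Set.mem_ofList _ _).2 h)
          have hw0 : w.count x = 0 := List.count_eq_zero.2 this
          simp [hw0])]
    exact clamped_sum_eq w t
  · rw [nodup_sum_sub _ (PySem.Set.ofList t) _ hU (PySem.Set.nodup_ofList t)
      (fun x hx => (hmemU x).2 (Or.inl ((PySem.Set.mem_ofList _ _).1 hx)))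
      (by intro x _ hnx
          have : x ∉ t := fun h => hnx ((PySem.Set.mem_ofList _ _).2 h)
          have ht0 : t.count x = 0 := List.count_eq_zero.2 this
          simp [ht0])]
    exact clamped_sum_eq t w
-- length difference = difference of the two multiset-difference sizes
theorem len_sub_eq (w t : List Char) :
    (w.length : Int) - (t.length : Int)
      = ((((↑w : Multiset Char) - ↑t).card : Nat) : Int) - ((((↑t : Multiset Char) - ↑w).card : Nat) : Int) := by
  have h1 := Multiset.sub_add_inter (↑w : Multiset Char) (↑t)
  have h2 := Multiset.sub_add_inter (↑t : Multiset Char) (↑w)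
  have hc1 := congrArg Multiset.card h1
  have hc2 := congrArg Multiset.card h2
  rw [Multiset.card_add] at hc1 hc2
  rw [Multiset.inter_comm] at hc2
  have hw : (↑w : Multiset Char).card = w.length := Multiset.coe_card w
  have ht : (↑t : Multiset Char).card = t.length := Multiset.coe_card t
  omega

-- ===== VERDICT =====
theorem count_similar_word_spec : Claim_equal_count_similar_word := by
  intro words target _
  show count_similar_word words target = count_similar_word_alt words target
  simp only [count_similar_word, count_similar_word_alt]
  congr 1
  funext count word
  rw [pvLoopA_eq _ _ _ _ (by norm_num), unionSum_eq word.toList target.toList,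
      pvMerge_eq _ _ 0 0
        (PySem.List.sorted_pairwise word.toList (fun c => c) )
        (PySem.List.sorted_pairwise target.toList (fun c => c))]
  have hperm_w : ((↑(PySem.List.sorted word.toList (fun c => c) false) : Multiset Char))
      = (↑word.toList : Multiset Char) :=
    Multiset.coe_eq_coe.2 (PySem.List.sorted_perm word.toList (fun c => c) false)
  have hperm_t : ((↑(PySem.List.sorted target.toList (fun c => c) false) : Multiset Char))
      = (↑target.toList : Multiset Char) :=
    Multiset.coe_eq_coe.2 (PySem.List.sorted_perm target.toList (fun c => c) false)
  rw [hperm_w, hperm_t]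
  set A : Nat := ((↑word.toList : Multiset Char) - ↑target.toList).card with hA
  set B : Nat := ((↑target.toList : Multiset Char) - ↑word.toList).card with hB
  have hlen : PySem.Str.len word - PySem.Str.len target = (A : Int) - (B : Int) := by
    rw [PySem.Str.len_eq, PySem.Str.len_eq]
    exact len_sub_eq word.toList target.toList
  have hL : |PySem.Str.len word - PySem.Str.len target| = |(A : Int) - (B : Int)| :=
    congrArg abs hlen
  rw [hL]
  rcases abs_cases ((A : Int) - (B : Int)) with ⟨he, hge⟩ | ⟨he, hlt⟩ <;> rw [he] <;>
    by_cases hle : (0 : Int) + ((A : Int) + (B : Int)) ≤ 2 <;>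
      simp only [hle, if_true, if_false] <;> split_ifs <;> first | rfl | omega
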